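-- pv_equiv track=rewrite | github.com/briankiume/SumSlice | SumSlice.py | sumSlice
-- ===== SOURCE A (Python) =====
-- def sumSlice(a):
--     sums = []
--     for x in range(len(a)):
--         for y in range(x + 1, len(a)):
--             if a[x] == a[y]:
--                 sum_ = a[x]
--             else:
--                 sum_ = a[x] + a[y]
--             sums.append(sum_)
--     max_sum = max(sums)
--     return max_sum
-- ===== SOURCE B (Python) =====
-- def sumSlice(a):
--     # One pass splits a into its distinct values and the values seen more than once;
--     # the answer is the best of (largest value + largest different value) and the
--     # largest duplicated value.
--     seen = set()
--     dups = []
--     for v in a: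
--         if v in seen:
--             dups.append(v)
--         else:
--             seen.add(v)
--     top = max(seen)
--     cands = []
--     others = [v for v in seen if v != top]
--     if others:
--         cands.append(top + max(others))
--     if dups:
--         cands.append(max(dups))
--     return max(cands)
-- ===== Notes on version B (the rewrite author's own statement) =====
-- stated objective: faster
-- what changed: Replaces A's scan over all O(n^2) index pairs by a single pass that splits the list into its distinct values and its duplicated values, then combines two closed-form candidates: (largest value + largest different value) and the largest duplicated value.
import Mathlib
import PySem

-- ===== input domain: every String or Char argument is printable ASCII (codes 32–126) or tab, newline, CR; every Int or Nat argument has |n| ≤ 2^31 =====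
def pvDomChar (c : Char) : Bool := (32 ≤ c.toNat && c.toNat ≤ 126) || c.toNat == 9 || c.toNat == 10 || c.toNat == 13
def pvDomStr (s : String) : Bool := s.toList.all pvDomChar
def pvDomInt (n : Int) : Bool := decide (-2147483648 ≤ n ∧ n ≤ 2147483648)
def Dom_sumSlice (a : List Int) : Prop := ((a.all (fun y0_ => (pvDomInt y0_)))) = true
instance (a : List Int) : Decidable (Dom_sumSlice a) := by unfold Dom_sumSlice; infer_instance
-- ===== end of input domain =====

-- B replaces A's quadratic scan over all pairs by one pass that splits the list into
-- its distinct values and the duplicated values, combining three closed-form candidates.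

-- ===== PORT A =====
def sumSlice (a : List Int) : Int :=
  let n : Int := (a.length : Int)
  let sums : List Int :=
    (PySem.List.pyRange 0 n 1).foldl (fun sums x =>
      (PySem.List.pyRange (x + 1) n 1).foldl (fun sums y =>
        let sum_ : Int :=
          if PySem.List.pyGetD a x 0 == PySem.List.pyGetD a y 0 then PySem.List.pyGetD a x 0
          else PySem.List.pyGetD a x 0 + PySem.List.pyGetD a y 0
        sums ++ [sum_]) sums) []
  (PySem.List.max? sums (fun z => z)).getD 0

-- ===== PORT B =====
def sumSlice_alt (a : List Int) : Int :=
  let st : PySem.Set Int × List Int :=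
    a.foldl (fun st v =>
      if PySem.Set.contains st.1 v then (st.1, st.2 ++ [v])
      else (PySem.Set.add st.1 v, st.2)) (PySem.Set.empty, [])
  let seen := st.1
  let dups := st.2
  let top := (PySem.List.max? seen (fun z => z)).getD 0
  let others := seen.filter (fun v => v != top)
  let cands : List Int := []
  let cands := if others ≠ [] then cands ++ [top + (PySem.List.max? others (fun z => z)).getD 0] else cands
  let cands := if dups ≠ [] then cands ++ [(PySem.List.max? dups (fun z => z)).getD 0] else cands
  (PySem.List.max? cands (fun z => z)).getD 0

-- ===== PRECONDITION & SPEC =====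
-- Pre_ excludes lists with fewer than two elements: there are no index pairs, and both
-- A and B raise ValueError there (max of an empty sequence).
def Pre_sumSlice (a : List Int) : Prop := 2 ≤ a.length
instance (a : List Int) : Decidable (Pre_sumSlice a) := by unfold Pre_sumSlice; infer_instance
def pvWitness_sumSlice : List Int := ([1, 2, 2])
def Spec_sumSlice (a : List Int) (out : Int) : Prop := out = sumSlice_alt a
instance (a : List Int) (out : Int) : Decidable (Spec_sumSlice a out) := by unfold Spec_sumSlice; infer_instance

-- ===== CLAIM (what is proved, stated in full; the proofs are below) =====
def Claim_equal_sumSlice : Prop := ∀ (a : List Int), Dom_sumSlice a → Pre_sumSlice a → Spec_sumSlice a (sumSlice a)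

-- ===== LEMMAS AND PROOFS =====

-- the pair value A computes: a[x] if equal, else the sum
def pairVal (u v : Int) : Int := if u == v then u else u + v

theorem pairVal_self (u : Int) : pairVal u u = u := by simp [pairVal]

theorem pairVal_of_ne {u v : Int} (h : u ≠ v) : pairVal u v = u + v := by
  simp [pairVal, h]

-- A's sums list, in closed form
def sumsList (a : List Int) : List Int :=
  (PySem.List.pyRange 0 (a.length : Int) 1).flatMap (fun x =>
    (PySem.List.pyRange (x + 1) (a.length : Int) 1).map (fun y =>
      pairVal (PySem.List.pyGetD a x 0) (PySem.List.pyGetD a y 0)))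

theorem sumSlice_eq_max_sumsList (a : List Int) :
    sumSlice a = (PySem.List.max? (sumsList a) (fun z => z)).getD 0 := by
  unfold sumSlice sumsList
  dsimp only
  have hinner : ∀ (acc : List Int) (x : Int),
      List.foldl (fun sums y => sums ++
          [if (PySem.List.pyGetD a x 0 == PySem.List.pyGetD a y 0) = true then PySem.List.pyGetD a x 0
            else PySem.List.pyGetD a x 0 + PySem.List.pyGetD a y 0]) acc
          (PySem.List.pyRange (x + 1) (a.length : Int) 1)
        = acc ++ (PySem.List.pyRange (x + 1) (a.length : Int) 1).map (fun y =>
            pairVal (PySem.List.pyGetD a x 0) (PySem.List.pyGetD a y 0)) := by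
    intro acc x
    exact PySem.List.foldl_append_singleton_eq_map _ _ _
  simp only [hinner]
  rw [PySem.List.foldl_append_eq_flatMap]
  rfl

-- membership in the sums list = a pair of positions i < j
theorem mem_sumsList {a : List Int} {z : Int} :
    z ∈ sumsList a ↔ ∃ i j : Nat, i < j ∧ j < a.length ∧
      z = pairVal (a.getD i 0) (a.getD j 0) := by
  unfold sumsList
  simp only [List.mem_flatMap, List.mem_map, PySem.List.mem_pyRange_one]
  constructor
  · rintro ⟨x, ⟨hx0, hxn⟩, y, ⟨hy1, hyn⟩, hz⟩
    refine ⟨x.toNat, y.toNat, by omega, by omega, ?_⟩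
    rw [PySem.List.pyGetD_of_nonneg a 0 hx0, PySem.List.pyGetD_of_nonneg a 0 (by omega)] at hz
    exact hz.symm
  · rintro ⟨i, j, hij, hj, hz⟩
    refine ⟨(i : Int), ⟨by omega, by omega⟩, (j : Int), ⟨by omega, by omega⟩, ?_⟩
    rw [PySem.List.pyGetD_of_nonneg a 0 (by omega), PySem.List.pyGetD_of_nonneg a 0 (by omega)]
    simpa using hz.symm

-- two positions i < j ↔ a two-element sublist
theorem pair_sublist_iff (a : List Int) (u v : Int) :
    [u, v].Sublist a ↔ ∃ i j : Nat, i < j ∧ j < a.length ∧ a.getD i 0 = u ∧ a.getD j 0 = v := by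
  induction a with
  | nil => simp
  | cons h t ih =>
    constructor
    · intro hs
      rcases List.sublist_cons_iff.mp hs with hs' | ⟨r, hr, hrs⟩
      · rcases ih.mp hs' with ⟨i, j, hij, hj, hu, hv⟩
        exact ⟨i + 1, j + 1, by omega, by simp; omega, by simpa using hu, by simpa using hv⟩
      · have hu : u = h := by injection hr
        have hr2 : r = [v] := by injection hr with _ h2; exact h2.symm
        subst hr2
        have hv : v ∈ t := List.singleton_sublist.mp hrs
        rcases List.mem_iff_getElem.mp hv with ⟨k, hk, hvk⟩
        refine ⟨0, k + 1, by omega, by simp; omega, by simpa using hu.symm, ?_⟩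
        simp [List.getElem?_eq_getElem hk, hvk, List.getD]
    · rintro ⟨i, j, hij, hj, hu, hv⟩
      cases i with
      | zero =>
        simp at hu
        subst hu
        apply List.cons_sublist_cons.mpr
        apply List.singleton_sublist.mpr
        have hj' : j - 1 < t.length := by simp at hj; omega
        have : t.getD (j - 1) 0 = v := by
          cases j with
          | zero => omega
          | succ j' => simpa using hv
        rw [← this, List.getD_eq_getElem t 0 hj']
        exact List.getElem_mem _
      | succ i' =>
        apply List.sublist_cons_of_sublist
        apply ih.mpr
        cases j with
        | zero => omega
        | succ j' =>
          exact ⟨i', j', by omega, by simp at hj; omega, by simpa using hu, by simpa using hv⟩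

-- two distinct members give a two-element sublist, in one order or the other
theorem sublist_of_two_mem {a : List Int} {u v : Int} (hu : u ∈ a) (hv : v ∈ a) (huv : u ≠ v) :
    [u, v].Sublist a ∨ [v, u].Sublist a := by
  induction a with
  | nil => simp at hu
  | cons h t ih =>
    rcases List.mem_cons.mp hu with rfl | hu'
    · left
      apply List.cons_sublist_cons.mpr
      apply List.singleton_sublist.mpr
      rcases List.mem_cons.mp hv with rfl | hv'
      · exact absurd rfl huv
      · exact hv'
    · rcases List.mem_cons.mp hv with rfl | hv'
      · right
        exact List.cons_sublist_cons.mpr (List.singleton_sublist.mpr hu')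
      · rcases ih hu' hv' with h1 | h1
        · exact Or.inl (List.sublist_cons_of_sublist _ h1)
        · exact Or.inr (List.sublist_cons_of_sublist _ h1)

-- the loop invariant of B's single pass
theorem fold_inv (l : List Int) (s : PySem.Set Int) (d : List Int) :
    (∀ v, v ∈ (l.foldl (fun st v =>
        if PySem.Set.contains st.1 v then (st.1, st.2 ++ [v])
        else (PySem.Set.add st.1 v, st.2)) (s, d)).1 ↔ v ∈ s ∨ v ∈ l) ∧
    (∀ v, v ∈ (l.foldl (fun st v =>
        if PySem.Set.contains st.1 v then (st.1, st.2 ++ [v])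
        else (PySem.Set.add st.1 v, st.2)) (s, d)).2 ↔
        v ∈ d ∨ (v ∈ s ∧ v ∈ l) ∨ 2 ≤ l.count v) := by
  induction l generalizing s d with
  | nil => simp
  | cons h t ih =>
    by_cases hmem : h ∈ s
    · have hc : PySem.Set.contains s h = true := by
        simp [PySem.Set.contains]; exact hmem
      simp only [List.foldl_cons, hc, if_pos]
      refine ⟨fun v => ?_, fun v => ?_⟩
      · rw [(ih s (d ++ [h])).1 v]
        simp only [List.mem_cons]
        by_cases hvh : v = h
        · subst hvh; simp [hmem]
        · tauto
      · rw [(ih s (d ++ [h])).2 v]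
        by_cases hvh : v = h
        · subst hvh
          simp [hmem]
        · have hnh : ¬ (h = v) := fun e => hvh e.symm
          simp only [List.mem_append, List.mem_cons, List.count_cons,
            List.not_mem_nil, hvh, beq_iff_eq, if_neg hnh, or_false, false_or, add_zero]
    · have hc : PySem.Set.contains s h = false := by
        simp [PySem.Set.contains]; exact hmem
      simp only [List.foldl_cons, hc, Bool.false_eq_true, if_neg, not_false_iff]
      have hadd : ∀ v, v ∈ PySem.Set.add s h ↔ v ∈ s ∨ v = h := by
        intro v
        simp [PySem.Set.add, PySem.Set.contains, hmem]
      refine ⟨fun v => ?_, fun v => ?_⟩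
      · rw [(ih (PySem.Set.add s h) d).1 v]
        simp only [List.mem_cons, hadd v]
        tauto
      · rw [(ih (PySem.Set.add s h) d).2 v]
        by_cases hvh : v = h
        · subst hvh
          have h1 : 1 ≤ t.count v ↔ v ∈ t := List.one_le_count_iff
          have h2 : (v :: t).count v = t.count v + 1 := by simp
          have h3 : v ∈ PySem.Set.add s v := by rw [hadd]; right; rfl
          constructor
          · rintro (hd | ⟨_, hvt⟩ | hcnt)
            · exact Or.inl hd
            · have := h1.mpr hvt
              refine Or.inr (Or.inr ?_); omega
            · refine Or.inr (Or.inr ?_); omega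
          · rintro (hd | ⟨hvs, _⟩ | hcnt)
            · exact Or.inl hd
            · exact absurd hvs hmem
            · rw [h2] at hcnt
              have hm : v ∈ t := h1.mp (by omega)
              exact Or.inr (Or.inl ⟨h3, hm⟩)
        · have hnh : ¬ (h = v) := fun e => hvh e.symm
          simp only [List.mem_cons, List.count_cons, hadd v, hvh, beq_iff_eq,
            if_neg hnh, add_zero, or_false, false_or]

-- max of a nonempty list: a member that bounds every member
theorem maxD_spec (l : List Int) (hl : l ≠ []) :
    (PySem.List.max? l (fun z => z)).getD 0 ∈ l ∧
    ∀ y ∈ l, y ≤ (PySem.List.max? l (fun z => z)).getD 0 := by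
  cases hm : PySem.List.max? l (fun z => z) with
  | none => exact absurd ((PySem.List.max?_eq_none_iff l _).mp hm) hl
  | some m =>
    refine ⟨by simpa using PySem.List.max?_mem hm, fun y hy => by
      simpa using PySem.List.max?_isMax hm y hy⟩

theorem getD_mem {a : List Int} {i : Nat} (h : i < a.length) : a.getD i 0 ∈ a := by
  rw [List.getD_eq_getElem a 0 h]
  exact List.getElem_mem _

-- ===== VERDICT (by name: the statement is the Claim_ definition above) =====
theorem sumSlice_spec : Claim_equal_sumSlice := by
  intro a _ hpre
  unfold Pre_sumSlice at hpre
  unfold Spec_sumSlice sumSlice_alt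
  dsimp only
  rw [sumSlice_eq_max_sumsList]
  -- names for B's pieces
  set st := a.foldl (fun (st : PySem.Set Int × List Int) v =>
      if PySem.Set.contains st.1 v then (st.1, st.2 ++ [v])
      else (PySem.Set.add st.1 v, st.2)) (PySem.Set.empty, []) with hst
  set seen := st.1 with hseen
  set dups := st.2 with hdups
  have hseen_mem : ∀ v, v ∈ seen ↔ v ∈ a := by
    intro v
    rw [hseen, hst]
    rw [(fold_inv a PySem.Set.empty []).1 v]
    simp [PySem.Set.empty]
  have hdups_mem : ∀ v, v ∈ dups ↔ 2 ≤ a.count v := by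
    intro v
    rw [hdups, hst]
    rw [(fold_inv a PySem.Set.empty []).2 v]
    simp [PySem.Set.empty]
  have hane : a ≠ [] := by intro h; rw [h] at hpre; simp at hpre
  have hseen_ne : seen ≠ [] := by
    intro h
    rcases List.exists_mem_of_ne_nil a hane with ⟨x, hx⟩
    have := (hseen_mem x).mpr hx
    rw [h] at this; simp at this
  set top := (PySem.List.max? seen (fun z => z)).getD 0 with htop
  obtain ⟨htop_mem, htop_max⟩ := maxD_spec seen hseen_ne
  rw [← htop] at htop_mem htop_max
  have htop_a : top ∈ a := (hseen_mem top).mp htop_mem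
  have htop_ub : ∀ x ∈ a, x ≤ top := fun x hx => htop_max x ((hseen_mem x).mpr hx)
  set others := seen.filter (fun v => v != top) with hothers
  have hothers_mem : ∀ v, v ∈ others ↔ v ∈ a ∧ v ≠ top := by
    intro v
    rw [hothers]
    simp [List.mem_filter, hseen_mem v]
  -- the two candidate values
  set mo := (PySem.List.max? others (fun z => z)).getD 0 with hmo
  set md := (PySem.List.max? dups (fun z => z)).getD 0 with hmd
  set cands := (if others ≠ [] then ([] : List Int) ++ [top + mo] else []) with hcands
  set cands2 := (if dups ≠ [] then cands ++ [md] else cands) with hcands2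
  -- cands2 is nonempty
  have hcands2_ne : cands2 ≠ [] := by
    by_cases ho : others = []
    · have hdup : top ∈ dups := by
        rw [hdups_mem]
        -- every element of a equals top, and a has ≥ 2 elements
        have hall : ∀ x ∈ a, x = top := by
          intro x hx
          by_contra hne
          have : x ∈ others := (hothers_mem x).mpr ⟨hx, hne⟩
          rw [ho] at this; simp at this
        have : a.count top = a.length := by
          rw [List.count_eq_length]
          intro x hx
          exact ((hall x hx) ▸ rfl : top = x).symm ▸ rfl
        omega
      have hd : dups ≠ [] := fun h => by rw [h] at hdup; simp at hdup
      rw [hcands2, if_pos hd]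
      simp
    · rw [hcands2, hcands]
      by_cases hd : dups ≠ [] <;> simp [hd, ho]
  obtain ⟨hb_mem, hb_max⟩ := maxD_spec cands2 hcands2_ne
  set b := (PySem.List.max? cands2 (fun z => z)).getD 0 with hb
  -- facts about candidate membership in cands2
  have hc1 : others ≠ [] → top + mo ∈ cands2 := by
    intro ho
    rw [hcands2, hcands]
    by_cases hd : dups ≠ [] <;> simp [hd, ho]
  have hc2 : dups ≠ [] → md ∈ cands2 := by
    intro hd
    rw [hcands2]
    simp [hd]
  -- every element of cands2 is in sumsList a
  have hpair_mem : ∀ (u v : Int), [u, v].Sublist a → pairVal u v ∈ sumsList a := by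
    intro u v hs
    rcases (pair_sublist_iff a u v).mp hs with ⟨i, j, hij, hj, hu, hv⟩
    exact mem_sumsList.mpr ⟨i, j, hij, hj, by rw [hu, hv]⟩
  have hcand_in : ∀ c ∈ cands2, c ∈ sumsList a := by
    intro c hc
    have : c = top + mo ∧ others ≠ [] ∨ c = md ∧ dups ≠ [] := by
      rw [hcands2, hcands] at hc
      by_cases hd : dups ≠ [] <;> by_cases ho : others ≠ [] <;>
        simp [hd, ho] at hc <;> tauto
    rcases this with ⟨rfl, ho⟩ | ⟨rfl, hd⟩
    · -- top + mo: a pair with distinct values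
      obtain ⟨hmo_mem, _⟩ := maxD_spec others ho
      rw [← hmo] at hmo_mem
      rcases (hothers_mem mo).mp hmo_mem with ⟨hmo_a, hmo_ne⟩
      rcases sublist_of_two_mem htop_a hmo_a (fun e => hmo_ne e.symm) with hsl | hsl
      · have := hpair_mem top mo hsl
        rwa [pairVal_of_ne (fun e => hmo_ne e.symm)] at this
      · have := hpair_mem mo top hsl
        rwa [pairVal_of_ne hmo_ne, add_comm] at this
    · -- md: a duplicated value
      obtain ⟨hmd_mem, _⟩ := maxD_spec dups hd
      rw [← hmd] at hmd_mem
      have hcnt : 2 ≤ a.count md := (hdups_mem md).mp hmd_mem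
      have hsl : [md, md].Sublist a := by
        have h2 : [md, md] = List.replicate 2 md := rfl
        rw [h2]
        exact List.replicate_sublist_iff.mpr hcnt
      have := hpair_mem md md hsl
      rwa [pairVal_self] at this
  -- every element of sumsList a is ≤ b
  have hsum_le : ∀ z ∈ sumsList a, z ≤ b := by
    intro z hz
    rcases mem_sumsList.mp hz with ⟨i, j, hij, hj, hzv⟩
    have hi : i < a.length := by omega
    have hia : a.getD i 0 ∈ a := getD_mem hi
    have hja : a.getD j 0 ∈ a := getD_mem hj
    by_cases heq : a.getD i 0 = a.getD j 0
    · -- equal pair: value is duplicated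
      have hsl : [a.getD i 0, a.getD j 0].Sublist a :=
        (pair_sublist_iff a _ _).mpr ⟨i, j, hij, hj, rfl, rfl⟩
      have hcnt : 2 ≤ a.count (a.getD i 0) := by
        apply List.replicate_sublist_iff.mp
        have h2 : List.replicate 2 (a.getD i 0) = [a.getD i 0, a.getD j 0] := by
          rw [heq]; rfl
        rw [h2]
        exact hsl
      have hdv : a.getD i 0 ∈ dups := (hdups_mem _).mpr hcnt
      have hd : dups ≠ [] := fun h => by rw [h] at hdv; simp at hdv
      obtain ⟨_, hmd_max⟩ := maxD_spec dups hd
      rw [← hmd] at hmd_max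
      have h1 : a.getD i 0 ≤ md := hmd_max _ hdv
      have h2 : md ≤ b := hb_max _ (hc2 hd)
      rw [hzv, heq, pairVal_self]
      rw [← heq]
      omega
    · -- unequal pair: sum ≤ top + mo
      have hone : a.getD i 0 ≠ top ∨ a.getD j 0 ≠ top := by
        by_contra hcon
        rw [not_or] at hcon
        rcases hcon with ⟨h1', h2'⟩
        rw [not_not] at h1' h2'
        exact heq (h1'.trans h2'.symm)
      have ho : others ≠ [] := by
        rcases hone with hne | hne
        · exact fun h => by have := (hothers_mem _).mpr ⟨hia, hne⟩; rw [h] at this; simp at this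
        · exact fun h => by have := (hothers_mem _).mpr ⟨hja, hne⟩; rw [h] at this; simp at this
      obtain ⟨_, hmo_max⟩ := maxD_spec others ho
      rw [← hmo] at hmo_max
      have hsum : a.getD i 0 + a.getD j 0 ≤ top + mo := by
        rcases hone with hne | hne
        · have h1 : a.getD i 0 ≤ mo := hmo_max _ ((hothers_mem _).mpr ⟨hia, hne⟩)
          have h2 : a.getD j 0 ≤ top := htop_ub _ hja
          omega
        · have h1 : a.getD j 0 ≤ mo := hmo_max _ ((hothers_mem _).mpr ⟨hja, hne⟩)
          have h2 : a.getD i 0 ≤ top := htop_ub _ hia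
          omega
      have h3 : top + mo ≤ b := hb_max _ (hc1 ho)
      rw [hzv, pairVal_of_ne heq]
      omega
  -- conclude: max of sumsList = b
  have hsums_ne : sumsList a ≠ [] := by
    intro h
    have h01 : pairVal (a.getD 0 0) (a.getD 1 0) ∈ sumsList a :=
      mem_sumsList.mpr ⟨0, 1, by omega, by omega, rfl⟩
    rw [h] at h01; simp at h01
  obtain ⟨hm_mem, hm_max⟩ := maxD_spec (sumsList a) hsums_ne
  have hble : b ≤ (PySem.List.max? (sumsList a) (fun z => z)).getD 0 :=
    hm_max b (hcand_in b hb_mem)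
  have hleb : (PySem.List.max? (sumsList a) (fun z => z)).getD 0 ≤ b :=
    hsum_le _ hm_mem
  omega
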